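-- pv_equiv track=rewrite | github.com/ZZy979/LeetCode | Algorithms/2711/differenceOfDistinctValues_2.py | differenceOfDistinctValues
-- ===== SOURCE A (Python) =====
-- from typing import List
--
-- def differenceOfDistinctValues(grid: List[List[int]]) -> List[List[int]]:
--     m, n = len(grid), len(grid[0])
--     answer = [[0] * n for _ in range(m)]
--     # 对角线编号：k = i - j + n
--     for k in range(1, m + n):
--         min_j = max(n - k, 0)
--         max_j = min(m + n - 1 - k, n - 1)
--         s = set()
--         for j in range(min_j, max_j + 1):
--             i = k + j - n
--             answer[i][j] = len(s)
--             s.add(grid[i][j])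
--         s.clear()
--         for j in range(max_j, min_j - 1, -1):
--             i = k + j - n
--             answer[i][j] = abs(answer[i][j] - len(s))
--             s.add(grid[i][j])
--     return answer
-- ===== SOURCE B (Python) =====
-- from typing import List
--
-- def differenceOfDistinctValues(grid: List[List[int]]) -> List[List[int]]:
--     m, n = len(grid), len(grid[0])
--     answer = []
--     for i in range(m):
--         row = []
--         for j in range(n):
--             top_left = set()
--             a, b = i - 1, j - 1
--             while a >= 0 and b >= 0:
--                 top_left.add(grid[a][b])
--                 a -= 1
--                 b -= 1
--             bottom_right = set()
--             a, b = i + 1, j + 1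
--             while a < m and b < n:
--                 bottom_right.add(grid[a][b])
--                 a += 1
--                 b += 1
--             row.append(abs(len(top_left) - len(bottom_right)))
--         answer.append(row)
--     return answer
-- ===== Notes on version B (the rewrite author's own statement) =====
-- stated objective: simpler
-- what changed: Replaces the diagonal-numbering two-pass sweep (shared running set per diagonal, forward and backward, with in-place answer updates) by a direct per-cell computation that walks up-left and down-right from each cell collecting two fresh sets.
import Mathlib
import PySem

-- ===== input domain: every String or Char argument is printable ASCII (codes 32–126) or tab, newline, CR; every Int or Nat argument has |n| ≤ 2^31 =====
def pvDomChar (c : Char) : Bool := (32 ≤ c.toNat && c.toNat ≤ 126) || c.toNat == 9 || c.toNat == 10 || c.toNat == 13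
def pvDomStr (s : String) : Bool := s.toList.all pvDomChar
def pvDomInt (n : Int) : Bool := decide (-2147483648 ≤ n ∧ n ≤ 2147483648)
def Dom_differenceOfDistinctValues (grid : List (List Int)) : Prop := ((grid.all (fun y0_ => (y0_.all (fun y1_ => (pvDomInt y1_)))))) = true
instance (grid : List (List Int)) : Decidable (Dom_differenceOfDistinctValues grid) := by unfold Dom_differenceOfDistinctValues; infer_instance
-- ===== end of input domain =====

-- B replaces A's diagonal-numbering two-pass sweep (one shared running set per diagonal,
-- forward and backward, updating the answer matrix in place) by a direct per-cell walk
-- up-left and down-right building two fresh sets; objective: simpler (no speed claim).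

-- ===== PORT A =====
-- abs(x) on int (Python-exact; Int.natAbs cast back)
def pvAbs (x : Int) : Int := x.natAbs

-- grid[i][j] (total form; exact wherever Python does not raise, i.e. on Pre_)
def pvGetCell (g : List (List Int)) (i j : Int) : Int :=
  PySem.List.pyGetD (PySem.List.pyGetD g i []) j 0

-- answer[i][j] = v
def pvSetCell (ans : List (List Int)) (i j : Int) (v : Int) : List (List Int) :=
  PySem.List.pySetD ans i (PySem.List.pySetD (PySem.List.pyGetD ans i []) j v)

-- body of A's first (forward) loop over a diagonal: answer[i][j] = len(s); s.add(grid[i][j])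
def pvBody1 (g : List (List Int)) (n k : Int) (st : List (List Int) × PySem.Set Int) (j : Int) :
    List (List Int) × PySem.Set Int :=
  let i := k + j - n
  (pvSetCell st.1 i j (PySem.Set.len st.2), PySem.Set.add st.2 (pvGetCell g i j))

-- body of A's second (backward) loop: answer[i][j] = abs(answer[i][j] - len(s)); s.add(grid[i][j])
def pvBody2 (g : List (List Int)) (n k : Int) (st : List (List Int) × PySem.Set Int) (j : Int) :
    List (List Int) × PySem.Set Int :=
  let i := k + j - n
  (pvSetCell st.1 i j (pvAbs (pvGetCell st.1 i j - PySem.Set.len st.2)),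
   PySem.Set.add st.2 (pvGetCell g i j))

-- one iteration of A's outer loop over diagonal numbers k = i - j + n
def pvDiagStep (g : List (List Int)) (m n : Int) (answer : List (List Int)) (k : Int) :
    List (List Int) :=
  let min_j := max (n - k) 0
  let max_j := min (m + n - 1 - k) (n - 1)
  let p1 := (PySem.List.pyRange min_j (max_j + 1) 1).foldl (pvBody1 g n k) (answer, PySem.Set.empty)
  let p2 := (PySem.List.pyRange max_j (min_j - 1) (-1)).foldl (pvBody2 g n k) (p1.1, PySem.Set.empty)
  p2.1

def differenceOfDistinctValues (grid : List (List Int)) : List (List Int) :=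
  let m : Int := grid.length
  let n : Int := (PySem.List.pyGetD grid 0 []).length
  let answer0 : List (List Int) :=
    (PySem.List.pyRange 0 m 1).map (fun _ => List.replicate n.toNat (0 : Int))
  (PySem.List.pyRange 1 (m + n) 1).foldl (pvDiagStep grid m n) answer0

-- ===== PORT B =====
-- while a >= 0 and b >= 0: top_left.add(grid[a][b]); a -= 1; b -= 1
-- (structural recursion on a fuel that exactly counts the remaining loop steps)
def pvWalkULAux (g : List (List Int)) : Nat → Int → Int → PySem.Set Int → PySem.Set Int
  | 0, _, _, s => s
  | fuel + 1, a, b, s =>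
    if 0 ≤ a ∧ 0 ≤ b then pvWalkULAux g fuel (a - 1) (b - 1) (PySem.Set.add s (pvGetCell g a b)) else s

def pvWalkUL (g : List (List Int)) (a b : Int) (s : PySem.Set Int) : PySem.Set Int :=
  pvWalkULAux g (min a b + 1).toNat a b s

-- while a < m and b < n: bottom_right.add(grid[a][b]); a += 1; b += 1
def pvWalkDRAux (g : List (List Int)) (m n : Int) : Nat → Int → Int → PySem.Set Int → PySem.Set Int
  | 0, _, _, s => s
  | fuel + 1, a, b, s =>
    if a < m ∧ b < n then pvWalkDRAux g m n fuel (a + 1) (b + 1) (PySem.Set.add s (pvGetCell g a b)) else s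

def pvWalkDR (g : List (List Int)) (m n a b : Int) (s : PySem.Set Int) : PySem.Set Int :=
  pvWalkDRAux g m n (min (m - a) (n - b)).toNat a b s

def differenceOfDistinctValues_alt (grid : List (List Int)) : List (List Int) :=
  let m : Int := grid.length
  let n : Int := (PySem.List.pyGetD grid 0 []).length
  (PySem.List.pyRange 0 m 1).map (fun i =>
    (PySem.List.pyRange 0 n 1).map (fun j =>
      pvAbs (PySem.Set.len (pvWalkUL grid (i - 1) (j - 1) PySem.Set.empty) -
        PySem.Set.len (pvWalkDR grid m n (i + 1) (j + 1) PySem.Set.empty))))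

-- ===== PRECONDITION & SPEC =====
-- A raises IndexError on the empty grid (len(grid[0])) and whenever some row is shorter than
-- row 0 (grid[i][j] with j < n); Pre_ excludes exactly those inputs.
def Pre_differenceOfDistinctValues (grid : List (List Int)) : Prop :=
  grid ≠ [] ∧ ∀ row ∈ grid, (grid.headD []).length ≤ row.length
instance (grid : List (List Int)) : Decidable (Pre_differenceOfDistinctValues grid) := by
  unfold Pre_differenceOfDistinctValues; infer_instance

def pvWitness_differenceOfDistinctValues : List (List Int) := [[1, 2], [3, 1]]

def Spec_differenceOfDistinctValues (grid : List (List Int)) (out : List (List Int)) : Prop := out = differenceOfDistinctValues_alt grid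
instance (grid : List (List Int)) (out : List (List Int)) : Decidable (Spec_differenceOfDistinctValues grid out) := by unfold Spec_differenceOfDistinctValues; infer_instance

-- ===== CLAIM (what is proved, stated in full; the proofs are below) =====
def Claim_equal_differenceOfDistinctValues : Prop := ∀ (grid : List (List Int)), Dom_differenceOfDistinctValues grid → Pre_differenceOfDistinctValues grid → Spec_differenceOfDistinctValues grid (differenceOfDistinctValues grid)

-- ===== LEMMAS AND PROOFS =====

-- reading answer[i][j] with Nat indices
def pvCell (ans : List (List Int)) (i j : Nat) : Int := (ans.getD i []).getD j 0

-- the answer matrix keeps its m × n shape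
def pvShape (mN nN : Nat) (ans : List (List Int)) : Prop :=
  ans.length = mN ∧ ∀ r ∈ ans, r.length = nN

-- values of diagonal k at columns [a, b), in increasing column order
def pvVlist (g : List (List Int)) (n k a b : Int) : List Int :=
  (PySem.List.pyRange a b 1).map (fun c => pvGetCell g (k + c - n) c)

-- the list of values B's up-left walk inserts, in insertion order
def pvULList (g : List (List Int)) : Nat → Int → Int → List Int
  | 0, _, _ => []
  | fuel + 1, a, b =>
    if 0 ≤ a ∧ 0 ≤ b then pvGetCell g a b :: pvULList g fuel (a - 1) (b - 1) else []

-- the list of values B's down-right walk inserts, in insertion order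
def pvDRList (g : List (List Int)) (m n : Int) : Nat → Int → Int → List Int
  | 0, _, _ => []
  | fuel + 1, a, b =>
    if a < m ∧ b < n then pvGetCell g a b :: pvDRList g m n fuel (a + 1) (b + 1) else []

-- B's value at cell (i, j)
def pvFinal (g : List (List Int)) (m n : Int) (i j : Nat) : Int :=
  pvAbs (PySem.Set.len (pvWalkUL g ((i : Int) - 1) ((j : Int) - 1) PySem.Set.empty) -
    PySem.Set.len (pvWalkDR g m n ((i : Int) + 1) ((j : Int) + 1) PySem.Set.empty))

-- invariant of A's outer loop: diagonals numbered below k are finished, the rest still 0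
def pvInv (g : List (List Int)) (mN nN : Nat) (n k : Int) (ans : List (List Int)) : Prop :=
  pvShape mN nN ans ∧ ∀ i j : Nat, i < mN → j < nN →
    pvCell ans i j = if (i : Int) - (j : Int) + n < k then pvFinal g (mN : Int) n i j else 0

lemma pv_ofList_len_eq {l1 l2 : List Int} (h : ∀ x, x ∈ l1 ↔ x ∈ l2) :
    (PySem.Set.ofList l1).length = (PySem.Set.ofList l2).length := by
  refine List.Perm.length_eq ?_
  refine (List.perm_ext_iff_of_nodup (PySem.Set.nodup_ofList _) (PySem.Set.nodup_ofList _)).2 ?_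
  intro a; simp [PySem.Set.mem_ofList, h a]

lemma pvWalkULAux_eq_update (g : List (List Int)) :
    ∀ (fuel : Nat) (a b : Int) (s : PySem.Set Int),
      pvWalkULAux g fuel a b s = PySem.Set.update s (pvULList g fuel a b) := by
  intro fuel
  induction fuel with
  | zero => intro a b s; simp [pvWalkULAux, pvULList, PySem.Set.update_nil]
  | succ f ih =>
    intro a b s
    by_cases h : 0 ≤ a ∧ 0 ≤ b
    · simp [pvWalkULAux, pvULList, h, ih, PySem.Set.update_cons]
    · simp [pvWalkULAux, pvULList, h, PySem.Set.update_nil]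

lemma pvWalkDRAux_eq_update (g : List (List Int)) (m n : Int) :
    ∀ (fuel : Nat) (a b : Int) (s : PySem.Set Int),
      pvWalkDRAux g m n fuel a b s = PySem.Set.update s (pvDRList g m n fuel a b) := by
  intro fuel
  induction fuel with
  | zero => intro a b s; simp [pvWalkDRAux, pvDRList, PySem.Set.update_nil]
  | succ f ih =>
    intro a b s
    by_cases h : a < m ∧ b < n
    · simp [pvWalkDRAux, pvDRList, h, ih, PySem.Set.update_cons]
    · simp [pvWalkDRAux, pvDRList, h, PySem.Set.update_nil]

lemma pv_mem_ULList (g : List (List Int)) :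
    ∀ (fuel : Nat) (a b : Int) (x : Int),
      x ∈ pvULList g fuel a b ↔
        ∃ t : Nat, (t < fuel ∧ 0 ≤ a - t ∧ 0 ≤ b - t) ∧ x = pvGetCell g (a - t) (b - t) := by
  intro fuel
  induction fuel with
  | zero => intro a b x; simp [pvULList]
  | succ f ih =>
    intro a b x
    by_cases h : 0 ≤ a ∧ 0 ≤ b
    · simp only [pvULList, if_pos h, List.mem_cons, ih]
      constructor
      · rintro (rfl | ⟨t, ht, rfl⟩)
        · exact ⟨0, by constructor <;> [omega; simp]⟩
        · refine ⟨t + 1, ⟨by omega, by push_cast at ht ⊢; omega, by push_cast at ht ⊢; omega⟩, ?_⟩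
          congr 1 <;> push_cast <;> ring
      · rintro ⟨t, ht, rfl⟩
        rcases Nat.eq_zero_or_pos t with rfl | htpos
        · left; congr 1 <;> push_cast <;> ring
        · right
          refine ⟨t - 1, ⟨by omega, ?_, ?_⟩, ?_⟩
          · push_cast at ht ⊢; omega
          · push_cast at ht ⊢; omega
          · congr 1 <;> push_cast [htpos] <;> omega
    · simp only [pvULList, if_neg h, List.not_mem_nil, false_iff]
      rintro ⟨t, ⟨-, h1, h2⟩, -⟩
      refine h ⟨by omega, by omega⟩

lemma pv_mem_DRList (g : List (List Int)) (m n : Int) :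
    ∀ (fuel : Nat) (a b : Int) (x : Int),
      x ∈ pvDRList g m n fuel a b ↔
        ∃ t : Nat, (t < fuel ∧ a + t < m ∧ b + t < n) ∧ x = pvGetCell g (a + t) (b + t) := by
  intro fuel
  induction fuel with
  | zero => intro a b x; simp [pvDRList]
  | succ f ih =>
    intro a b x
    by_cases h : a < m ∧ b < n
    · simp only [pvDRList, if_pos h, List.mem_cons, ih]
      constructor
      · rintro (rfl | ⟨t, ht, rfl⟩)
        · exact ⟨0, by constructor <;> [omega; simp]⟩
        · refine ⟨t + 1, ⟨by omega, by push_cast at ht ⊢; omega, by push_cast at ht ⊢; omega⟩, ?_⟩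
          congr 1 <;> push_cast <;> ring
      · rintro ⟨t, ht, rfl⟩
        rcases Nat.eq_zero_or_pos t with rfl | htpos
        · left; congr 1 <;> push_cast <;> ring
        · right
          refine ⟨t - 1, ⟨by omega, ?_, ?_⟩, ?_⟩
          · push_cast at ht ⊢; omega
          · push_cast at ht ⊢; omega
          · congr 1 <;> push_cast [htpos] <;> omega
    · simp only [pvDRList, if_neg h, List.not_mem_nil, false_iff]
      rintro ⟨t, ⟨-, h1, h2⟩, -⟩
      refine h ⟨by omega, by omega⟩

lemma pv_mem_Vlist (g : List (List Int)) (n k a b x : Int) :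
    x ∈ pvVlist g n k a b ↔ ∃ c : Int, (a ≤ c ∧ c < b) ∧ x = pvGetCell g (k + c - n) c := by
  simp only [pvVlist, List.mem_map, PySem.List.mem_pyRange_one]
  constructor
  · rintro ⟨c, hc, rfl⟩; exact ⟨c, hc, rfl⟩
  · rintro ⟨c, hc, rfl⟩; exact ⟨c, hc, rfl⟩

lemma pvGetCell_eq_cell (ans : List (List Int)) {i j : Int} (hi : 0 ≤ i) (hj : 0 ≤ j) :
    pvGetCell ans i j = pvCell ans i.toNat j.toNat := by
  simp [pvGetCell, pvCell, PySem.List.pyGetD_of_nonneg _ _ hi, PySem.List.pyGetD_of_nonneg _ _ hj]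

lemma pvCell_setCell (ans : List (List Int)) (i j v : Int) (i' j' : Nat)
    (hi0 : 0 ≤ i) (hj0 : 0 ≤ j) (hiL : i < (ans.length : Int))
    (hjL : j < ((ans.getD i.toNat []).length : Int)) :
    pvCell (pvSetCell ans i j v) i' j' =
      if (i' : Int) = i ∧ (j' : Int) = j then v else pvCell ans i' j' := by
  have hi' : i.toNat < ans.length := by omega
  have hj' : j.toNat < (ans.getD i.toNat []).length := by omega
  simp only [List.getD_eq_getElem?_getD] at hj'
  simp only [pvSetCell, PySem.List.pySetD_of_nonneg _ _ hi0, PySem.List.pySetD_of_nonneg _ _ hj0,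
    PySem.List.pyGetD_of_nonneg _ _ hi0, pvCell, List.getD_eq_getElem?_getD]
  by_cases hii : i' = i.toNat
  · subst hii
    rw [List.getElem?_set, if_pos rfl, if_pos hi', Option.getD_some, List.getElem?_set]
    by_cases hjj : j' = j.toNat
    · subst hjj
      rw [if_pos rfl, if_pos hj', Option.getD_some, if_pos ⟨by omega, by omega⟩]
    · rw [if_neg (fun hc => hjj hc.symm),
        if_neg (by omega : ¬(((i.toNat : Nat) : Int) = i ∧ ((j' : Nat) : Int) = j))]
  · rw [List.getElem?_set, if_neg (fun hc => hii hc.symm),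
      if_neg (by omega : ¬(((i' : Nat) : Int) = i ∧ ((j' : Nat) : Int) = j))]

lemma pvShape_setCell (mN nN : Nat) (ans : List (List Int)) (i j v : Int)
    (h : pvShape mN nN ans) (hi0 : 0 ≤ i) (hj0 : 0 ≤ j) : pvShape mN nN (pvSetCell ans i j v) := by
  obtain ⟨hlen, hrows⟩ := h
  simp only [pvSetCell, PySem.List.pySetD_of_nonneg _ _ hi0, PySem.List.pySetD_of_nonneg _ _ hj0,
    PySem.List.pyGetD_of_nonneg _ _ hi0]
  rcases Nat.lt_or_ge i.toNat ans.length with hlt | hge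
  · refine ⟨by simpa using hlen, ?_⟩
    intro r hr
    rcases List.mem_or_eq_of_mem_set hr with hr | rfl
    · exact hrows r hr
    · rw [List.length_set]
      exact hrows _ (by rw [List.getD_eq_getElem _ _ hlt]; exact List.getElem_mem hlt)
  · rw [List.set_eq_of_length_le hge]
    exact ⟨hlen, hrows⟩

lemma pvShape_row (mN nN : Nat) (ans : List (List Int)) (h : pvShape mN nN ans)
    {i : Nat} (hi : i < mN) : (ans.getD i []).length = nN := by
  obtain ⟨hlen, hrows⟩ := h
  have hil : i < ans.length := by omega
  exact hrows _ (by rw [List.getD_eq_getElem _ _ hil]; exact List.getElem_mem hil)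

-- appending the next column's value to a diagonal value list
lemma pvVlist_succ (g : List (List Int)) (n k a b : Int) (hab : a ≤ b) :
    pvVlist g n k a (b + 1) = pvVlist g n k a b ++ [pvGetCell g (k + b - n) b] := by
  unfold pvVlist
  rw [PySem.List.pyRange_one_succ_right hab, List.map_append]
  rfl

-- peeling the lowest column off a diagonal value list
lemma pvVlist_cons (g : List (List Int)) (n k a b : Int) (hab : a < b) :
    pvVlist g n k a b = pvGetCell g (k + a - n) a :: pvVlist g n k (a + 1) b := by
  unfold pvVlist
  rw [PySem.List.pyRange_one_cons hab]
  rfl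

lemma pvPass1 (g : List (List Int)) (mN nN : Nat) (n k minj maxj : Int)
    (hn : n = (nN : Int)) (hminj : minj = max (n - k) 0)
    (hmaxj : maxj = min ((mN : Int) + n - 1 - k) (n - 1)) :
    ∀ (t : Nat) (j0 : Int) (ans : List (List Int)), (maxj + 1 - j0).toNat = t →
      minj ≤ j0 → j0 ≤ maxj + 1 → pvShape mN nN ans →
      (((PySem.List.pyRange j0 (maxj + 1) 1).foldl (pvBody1 g n k)
          (ans, PySem.Set.ofList (pvVlist g n k minj j0))).2 =
        PySem.Set.ofList (pvVlist g n k minj (maxj + 1)) ∧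
      pvShape mN nN ((PySem.List.pyRange j0 (maxj + 1) 1).foldl (pvBody1 g n k)
          (ans, PySem.Set.ofList (pvVlist g n k minj j0))).1 ∧
      ∀ i j : Nat, i < mN → j < nN →
        pvCell ((PySem.List.pyRange j0 (maxj + 1) 1).foldl (pvBody1 g n k)
            (ans, PySem.Set.ofList (pvVlist g n k minj j0))).1 i j =
          if (i : Int) = k + (j : Int) - n ∧ j0 ≤ (j : Int) ∧ (j : Int) ≤ maxj
          then ((PySem.Set.ofList (pvVlist g n k minj (j : Int))).length : Int)
          else pvCell ans i j) := by
  intro t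
  induction t with
  | zero =>
    intro j0 ans ht h1 h2 hsh
    have hj0 : j0 = maxj + 1 := by omega
    subst hj0
    rw [PySem.List.pyRange_one_eq_nil (le_refl _)]
    refine ⟨rfl, hsh, ?_⟩
    intro i j hi hj
    rw [if_neg (by omega)]
    rfl
  | succ t ih =>
    intro j0 ans ht h1 h2 hsh
    have hlt : j0 < maxj + 1 := by omega
    have hb1 : 0 ≤ k + j0 - n := by omega
    have hb2 : k + j0 - n < (mN : Int) := by omega
    have hb3 : 0 ≤ j0 := by omega
    have hb4 : j0 < n := by omega
    have hiL : k + j0 - n < (ans.length : Int) := by rw [hsh.1]; exact hb2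
    have hjL : j0 < ((ans.getD (k + j0 - n).toNat []).length : Int) := by
      rw [pvShape_row mN nN ans hsh (by omega)]; omega
    have hbody : pvBody1 g n k (ans, PySem.Set.ofList (pvVlist g n k minj j0)) j0 =
        (pvSetCell ans (k + j0 - n) j0 ((PySem.Set.ofList (pvVlist g n k minj j0)).length),
         PySem.Set.ofList (pvVlist g n k minj (j0 + 1))) := by
      rw [pvVlist_succ g n k minj j0 h1, PySem.Set.ofList_append_singleton]
      rfl
    rw [PySem.List.pyRange_one_cons hlt, List.foldl_cons, hbody]
    have hsh1 : pvShape mN nN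
        (pvSetCell ans (k + j0 - n) j0 ((PySem.Set.ofList (pvVlist g n k minj j0)).length)) :=
      pvShape_setCell mN nN ans _ _ _ hsh hb1 hb3
    obtain ⟨ihs, ihsh, ihc⟩ := ih (j0 + 1) _ (by omega) (by omega) (by omega) hsh1
    refine ⟨ihs, ihsh, ?_⟩
    intro i j hi hj
    rw [ihc i j hi hj,
      pvCell_setCell ans (k + j0 - n) j0 _ i j hb1 hb3 hiL hjL]
    by_cases hd : (i : Int) = k + (j : Int) - n ∧ j0 ≤ (j : Int) ∧ (j : Int) ≤ maxj
    · by_cases hj0 : (j : Int) = j0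
      · rw [if_neg (by omega), if_pos (by omega : ((i:Int) = k + j0 - n ∧ (j:Int) = j0)),
          if_pos hd, hj0]
      · rw [if_pos (by omega : ((i:Int) = k + (j:Int) - n ∧ j0 + 1 ≤ (j:Int) ∧ (j:Int) ≤ maxj)),
          if_pos hd]
    · rw [if_neg (by omega), if_neg (by omega), if_neg hd]

lemma pvPass2 (g : List (List Int)) (mN nN : Nat) (n k minj maxj : Int)
    (hn : n = (nN : Int)) (hminj : minj = max (n - k) 0)
    (hmaxj : maxj = min ((mN : Int) + n - 1 - k) (n - 1)) :
    ∀ (t : Nat) (j0 : Int) (ans : List (List Int)), (j0 - (minj - 1)).toNat = t →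
      minj - 1 ≤ j0 → j0 ≤ maxj → pvShape mN nN ans →
      (pvShape mN nN ((PySem.List.pyRange j0 (minj - 1) (-1)).foldl (pvBody2 g n k)
          (ans, PySem.Set.ofList (pvVlist g n k (j0 + 1) (maxj + 1)).reverse)).1 ∧
      ∀ i j : Nat, i < mN → j < nN →
        pvCell ((PySem.List.pyRange j0 (minj - 1) (-1)).foldl (pvBody2 g n k)
            (ans, PySem.Set.ofList (pvVlist g n k (j0 + 1) (maxj + 1)).reverse)).1 i j =
          if (i : Int) = k + (j : Int) - n ∧ minj ≤ (j : Int) ∧ (j : Int) ≤ j0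
          then pvAbs (pvCell ans i j -
            ((PySem.Set.ofList (pvVlist g n k ((j : Int) + 1) (maxj + 1)).reverse).length : Int))
          else pvCell ans i j) := by
  intro t
  induction t with
  | zero =>
    intro j0 ans ht h1 h2 hsh
    have hj0 : j0 = minj - 1 := by omega
    subst hj0
    rw [PySem.List.pyRange_neg_one_eq_nil (le_refl _)]
    refine ⟨hsh, ?_⟩
    intro i j hi hj
    rw [if_neg (by omega)]
    rfl
  | succ t ih =>
    intro j0 ans ht h1 h2 hsh
    have hge : minj ≤ j0 := by omega
    have hb1 : 0 ≤ k + j0 - n := by omega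
    have hb2 : k + j0 - n < (mN : Int) := by omega
    have hb3 : 0 ≤ j0 := by omega
    have hb4 : j0 < n := by omega
    have hiL : k + j0 - n < (ans.length : Int) := by rw [hsh.1]; exact hb2
    have hjL : j0 < ((ans.getD (k + j0 - n).toNat []).length : Int) := by
      rw [pvShape_row mN nN ans hsh (by omega)]; omega
    have hbody : pvBody2 g n k
        (ans, PySem.Set.ofList (pvVlist g n k (j0 + 1) (maxj + 1)).reverse) j0 =
        (pvSetCell ans (k + j0 - n) j0
          (pvAbs (pvGetCell ans (k + j0 - n) j0 -
            ((PySem.Set.ofList (pvVlist g n k (j0 + 1) (maxj + 1)).reverse).length : Int))),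
         PySem.Set.ofList (pvVlist g n k (j0 - 1 + 1) (maxj + 1)).reverse) := by
      rw [show j0 - 1 + 1 = j0 by ring,
        pvVlist_cons g n k j0 (maxj + 1) (by omega), List.reverse_cons,
        PySem.Set.ofList_append_singleton]
      rfl
    rw [PySem.List.pyRange_neg_one_cons (by omega : minj - 1 < j0), List.foldl_cons, hbody]
    have hsh1 : pvShape mN nN (pvSetCell ans (k + j0 - n) j0
        (pvAbs (pvGetCell ans (k + j0 - n) j0 -
          ((PySem.Set.ofList (pvVlist g n k (j0 + 1) (maxj + 1)).reverse).length : Int)))) :=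
      pvShape_setCell mN nN ans _ _ _ hsh hb1 hb3
    obtain ⟨ihsh, ihc⟩ := ih (j0 - 1) _ (by omega) (by omega) (by omega) hsh1
    refine ⟨ihsh, ?_⟩
    intro i j hi hj
    rw [ihc i j hi hj,
      pvCell_setCell ans (k + j0 - n) j0 _ i j hb1 hb3 hiL hjL]
    by_cases hd : (i : Int) = k + (j : Int) - n ∧ minj ≤ (j : Int) ∧ (j : Int) ≤ j0
    · by_cases hj0 : (j : Int) = j0
      · rw [if_neg (by omega), if_pos (by omega : ((i:Int) = k + j0 - n ∧ (j:Int) = j0)),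
          if_pos hd]
        have hij : pvGetCell ans (k + j0 - n) j0 = pvCell ans i j := by
          rw [pvGetCell_eq_cell ans hb1 hb3]
          congr 1 <;> omega
        rw [hij, hj0]
      · rw [if_pos (by omega : ((i:Int) = k + (j:Int) - n ∧ minj ≤ (j:Int) ∧ (j:Int) ≤ j0 - 1)),
          if_pos hd, if_neg (by omega)]
    · rw [if_neg (by omega), if_neg (by omega), if_neg hd]

lemma pv_ul_count (g : List (List Int)) (mN nN : Nat) (n k : Int) (i j : Nat)
    (hn : n = (nN : Int)) (hi : i < mN) (hj : j < nN) (hk : k = (i : Int) - (j : Int) + n) :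
    ((PySem.Set.ofList (pvVlist g n k (max (n - k) 0) (j : Int))).length : Int) =
      PySem.Set.len (pvWalkUL g ((i : Int) - 1) ((j : Int) - 1) PySem.Set.empty) := by
  rw [pvWalkUL, pvWalkULAux_eq_update, PySem.Set.update_empty]
  have hmem : ∀ x, x ∈ pvVlist g n k (max (n - k) 0) (j : Int) ↔
      x ∈ pvULList g ((min ((i : Int) - 1) ((j : Int) - 1) + 1).toNat)
        ((i : Int) - 1) ((j : Int) - 1) := by
    intro x
    rw [pv_mem_Vlist, pv_mem_ULList]
    constructor
    · rintro ⟨c, ⟨hc1, hc2⟩, rfl⟩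
      refine ⟨((j : Int) - 1 - c).toNat, ⟨by omega, by omega, by omega⟩, ?_⟩
      congr 1 <;> omega
    · rintro ⟨t, ⟨ht1, ht2, ht3⟩, rfl⟩
      refine ⟨(j : Int) - 1 - (t : Int), ⟨by omega, by omega⟩, ?_⟩
      congr 1 <;> omega
  simp [PySem.Set.len, pv_ofList_len_eq hmem]

lemma pv_dr_count (g : List (List Int)) (mN nN : Nat) (n k : Int) (i j : Nat)
    (hn : n = (nN : Int)) (hi : i < mN) (hj : j < nN) (hk : k = (i : Int) - (j : Int) + n) :
    ((PySem.Set.ofList (pvVlist g n k ((j : Int) + 1)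
        (min ((mN : Int) + n - 1 - k) (n - 1) + 1)).reverse).length : Int) =
      PySem.Set.len (pvWalkDR g (mN : Int) n ((i : Int) + 1) ((j : Int) + 1) PySem.Set.empty) := by
  rw [pvWalkDR, pvWalkDRAux_eq_update, PySem.Set.update_empty]
  have hmem : ∀ x, x ∈ (pvVlist g n k ((j : Int) + 1)
      (min ((mN : Int) + n - 1 - k) (n - 1) + 1)).reverse ↔
      x ∈ pvDRList g (mN : Int) n ((min ((mN : Int) - ((i : Int) + 1)) (n - ((j : Int) + 1))).toNat)
        ((i : Int) + 1) ((j : Int) + 1) := by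
    intro x
    rw [List.mem_reverse, pv_mem_Vlist, pv_mem_DRList]
    constructor
    · rintro ⟨c, ⟨hc1, hc2⟩, rfl⟩
      refine ⟨(c - ((j : Int) + 1)).toNat, ⟨by omega, by omega, by omega⟩, ?_⟩
      congr 1 <;> omega
    · rintro ⟨t, ⟨ht1, ht2, ht3⟩, rfl⟩
      refine ⟨(j : Int) + 1 + (t : Int), ⟨by omega, by omega⟩, ?_⟩
      congr 1 <;> omega
  simp [PySem.Set.len, pv_ofList_len_eq hmem]

lemma pvStep (g : List (List Int)) (mN nN : Nat) (n k : Int) (ans : List (List Int))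
    (hn : n = (nN : Int)) (hm : 1 ≤ mN) (hk1 : 1 ≤ k) (hk2 : k < (mN : Int) + n)
    (h : pvInv g mN nN n k ans) : pvInv g mN nN n (k + 1) (pvDiagStep g (mN : Int) n ans k) := by
  obtain ⟨hsh, hcell⟩ := h
  have h0a : PySem.Set.ofList (pvVlist g n k (max (n - k) 0) (max (n - k) 0)) =
      PySem.Set.empty := by
    unfold pvVlist
    rw [PySem.List.pyRange_one_eq_nil (le_refl _)]
    rfl
  have h0b : PySem.Set.ofList (pvVlist g n k (min ((mN : Int) + n - 1 - k) (n - 1) + 1)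
      (min ((mN : Int) + n - 1 - k) (n - 1) + 1)).reverse = PySem.Set.empty := by
    unfold pvVlist
    rw [PySem.List.pyRange_one_eq_nil (le_refl _)]
    rfl
  obtain ⟨-, hsh1, hc1⟩ := pvPass1 g mN nN n k _ _ hn rfl rfl _ (max (n - k) 0) ans rfl
    (le_refl _) (by omega) hsh
  rw [h0a] at hsh1 hc1
  obtain ⟨hsh2, hc2⟩ := pvPass2 g mN nN n k _ _ hn rfl rfl _
    (min ((mN : Int) + n - 1 - k) (n - 1)) _ rfl (by omega) (le_refl _) hsh1
  rw [h0b] at hsh2 hc2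
  have hdiag : pvDiagStep g (mN : Int) n ans k =
      ((PySem.List.pyRange (min ((mN : Int) + n - 1 - k) (n - 1)) (max (n - k) 0 - 1) (-1)).foldl
        (pvBody2 g n k)
        ((((PySem.List.pyRange (max (n - k) 0) (min ((mN : Int) + n - 1 - k) (n - 1) + 1) 1).foldl
          (pvBody1 g n k) (ans, PySem.Set.empty))).1, PySem.Set.empty)).1 := rfl
  constructor
  · rw [hdiag]; exact hsh2
  · intro i j hi hj
    rw [hdiag, hc2 i j hi hj]
    by_cases hd : (i : Int) = k + (j : Int) - n
    · have hc' : max (n - k) 0 ≤ (j : Int) ∧ (j : Int) ≤ min ((mN : Int) + n - 1 - k) (n - 1) := by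
        omega
      rw [if_pos ⟨hd, hc'.1, hc'.2⟩, hc1 i j hi hj, if_pos ⟨hd, hc'.1, hc'.2⟩,
        if_pos (by omega : (i : Int) - (j : Int) + n < k + 1)]
      unfold pvFinal
      rw [pv_ul_count g mN nN n k i j hn hi hj (by omega),
        pv_dr_count g mN nN n k i j hn hi hj (by omega)]
    · rw [if_neg (fun hc => hd hc.1), hc1 i j hi hj, if_neg (fun hc => hd hc.1),
        hcell i j hi hj]
      by_cases hlt : (i : Int) - (j : Int) + n < k
      · rw [if_pos hlt, if_pos (by omega)]
      · rw [if_neg hlt, if_neg (by omega)]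

lemma pvOuter (g : List (List Int)) (mN nN : Nat) (n : Int)
    (hn : n = (nN : Int)) (hm : 1 ≤ mN) :
    ∀ (t : Nat) (k : Int) (ans : List (List Int)), ((mN : Int) + n - k).toNat = t →
      1 ≤ k → k ≤ (mN : Int) + n → pvInv g mN nN n k ans →
      pvInv g mN nN n ((mN : Int) + n)
        ((PySem.List.pyRange k ((mN : Int) + n) 1).foldl (pvDiagStep g (mN : Int) n) ans) := by
  intro t
  induction t with
  | zero =>
    intro k ans ht h1 h2 hinv
    have hk : k = (mN : Int) + n := by omega
    subst hk
    rw [PySem.List.pyRange_one_eq_nil (le_refl _)]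
    exact hinv
  | succ t ih =>
    intro k ans ht h1 h2 hinv
    have hk : k < (mN : Int) + n := by omega
    rw [PySem.List.pyRange_one_cons hk, List.foldl_cons]
    exact ih (k + 1) _ (by omega) (by omega) (by omega)
      (pvStep g mN nN n k ans hn hm h1 hk hinv)

-- ===== VERDICT (by name: the statement is the Claim_ definition above) =====
theorem differenceOfDistinctValues_spec : Claim_equal_differenceOfDistinctValues := by
  intro grid _ hpre
  obtain ⟨hne, hrows⟩ := hpre
  unfold Spec_differenceOfDistinctValues
  have hm1 : 1 ≤ grid.length := List.length_pos_of_ne_nil hne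
  have hinv0 : pvInv grid grid.length (PySem.List.pyGetD grid 0 []).length
      (((PySem.List.pyGetD grid 0 []).length : Nat) : Int) 1
      ((PySem.List.pyRange 0 (grid.length : Int) 1).map
        (fun _ => List.replicate (((PySem.List.pyGetD grid 0 []).length : Nat) : Int).toNat
          (0 : Int))) := by
    constructor
    · constructor
      · rw [List.length_map, PySem.List.length_pyRange_one]
        omega
      · intro r hr
        rcases List.mem_map.1 hr with ⟨c, -, rfl⟩
        simp
    · intro i j hi hj
      rw [if_neg (by omega)]
      unfold pvCell
      have hlen : i < ((PySem.List.pyRange 0 (grid.length : Int) 1).map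
          (fun _ => List.replicate (((PySem.List.pyGetD grid 0 []).length : Nat) : Int).toNat
            (0 : Int))).length := by
        rw [List.length_map, PySem.List.length_pyRange_one]
        omega
      rw [List.getD_eq_getElem _ _ hlen, List.getElem_map]
      simp
  have hfin := pvOuter grid grid.length (PySem.List.pyGetD grid 0 []).length _ rfl hm1
    ((grid.length : Int) + ((PySem.List.pyGetD grid 0 []).length : Int) - 1).toNat 1 _ rfl
    (le_refl _) (by omega) hinv0
  have hA : differenceOfDistinctValues grid =
      (PySem.List.pyRange 1
        ((grid.length : Int) + ((PySem.List.pyGetD grid 0 []).length : Int)) 1).foldl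
        (pvDiagStep grid (grid.length : Int) ((PySem.List.pyGetD grid 0 []).length : Int))
        ((PySem.List.pyRange 0 (grid.length : Int) 1).map
          (fun _ => List.replicate (((PySem.List.pyGetD grid 0 []).length : Nat) : Int).toNat
            (0 : Int))) := rfl
  rw [← hA] at hfin
  obtain ⟨⟨hlenA, hrowsA⟩, hcells⟩ := hfin
  have hB : differenceOfDistinctValues_alt grid =
      (PySem.List.pyRange 0 (grid.length : Int) 1).map (fun i =>
        (PySem.List.pyRange 0 ((PySem.List.pyGetD grid 0 []).length : Int) 1).map (fun j =>
          pvAbs (PySem.Set.len (pvWalkUL grid (i - 1) (j - 1) PySem.Set.empty) -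
            PySem.Set.len (pvWalkDR grid (grid.length : Int)
              ((PySem.List.pyGetD grid 0 []).length : Int) (i + 1) (j + 1)
              PySem.Set.empty)))) := rfl
  rw [hB]
  refine List.ext_getElem ?_ ?_
  · rw [hlenA, List.length_map, PySem.List.length_pyRange_one]
    omega
  · intro i hiA hiB
    have hi : i < grid.length := by rwa [hlenA] at hiA
    have hrowA : (differenceOfDistinctValues grid)[i].length =
        (PySem.List.pyGetD grid 0 []).length :=
      hrowsA _ (List.getElem_mem hiA)
    refine List.ext_getElem ?_ ?_
    · rw [hrowA, List.getElem_map, List.length_map, PySem.List.length_pyRange_one]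
      omega
    · intro j hjA hjB
      have hj : j < (PySem.List.pyGetD grid 0 []).length := by rwa [hrowA] at hjA
      have hL : (differenceOfDistinctValues grid)[i][j] =
          pvCell (differenceOfDistinctValues grid) i j := by
        unfold pvCell
        rw [List.getD_eq_getElem _ _ hiA, List.getD_eq_getElem _ _ hjA]
      rw [hL, hcells i j hi hj, if_pos (by omega)]
      simp only [List.getElem_map, PySem.List.getElem_pyRange_one]
      unfold pvFinal
      simp only [zero_add]
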